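-- pv_equiv track=rewrite | github.com/pypi-data/pypi-mirror-259 | packages/mhelper/mhelper-1.0.1.437.tar.gz/mhelper-1.0.1.437/mhelper/array_helper.py | lagged_iterate
-- ===== SOURCE A (Python) =====
-- from typing import List, Optional, Iterator, overload, Tuple, Dict, Iterable, Union, TypeVar, Callable, Sequence, Type, Collection, Reversible, Generic, Set
--
-- T = TypeVar( "T" )
--
-- def lagged_iterate( sequence: Iterable[Optional[T]], head = False, tail = False ) -> Iterator[Tuple[Optional[T], Optional[T]]]:
--     """
--     Yields all adjacent pairs in the sequence.
--
--     :param sequence:        Sequence to iterate over `(0, 1, 2, 3, ..., n)`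
--     :param head:            Include the head element `(None, 0)`. (off by default)
--     :param tail:            Include the tail element `(n, None)`. (off by default)
--     :return:                The iteration: `(0,1), (1,2), (2,3), (...,...), (n-1,n)`
--
--                                 `head`  `tail`      `result when sequence = (1)`     `result when sequence = (1, 2, 3)`
--                                 False   False                                                   (1, 2), (2, 3)
--                                 True    False       (None, 1)                        (None, 1), (1, 2), (2, 3)
--                                 True    True        (None, 1) (1, None)              (None, 1), (1, 2), (2, 3), (3, None)
--                                 False   True                  (1, None)                         (1, 2), (2, 3), (3, None)
--
--     """
--     has_any = 0
--     previous = None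
--
--     for current in sequence:
--         if has_any:
--             yield previous, current
--         elif head:
--             yield None, current
--
--         has_any += 1
--         previous = current
--
--     if tail:
--         yield previous, None
-- ===== SOURCE B (Python) =====
-- def lagged_iterate(sequence, head=False, tail=False):
--     items = list(sequence)
--     if head and items:
--         yield (None, items[0])
--     yield from zip(items, items[1:])
--     if tail:
--         yield (items[-1], None) if items else (None, None)
-- ===== Notes on version B (the rewrite author's own statement) =====
-- stated objective: idiomatic
-- what changed: Replaces the running previous/has_any state machine with materializing the sequence once and yielding an offset-zip of the list with its own tail, plus explicit head/tail items taken from the first and last elements.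
import Mathlib
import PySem

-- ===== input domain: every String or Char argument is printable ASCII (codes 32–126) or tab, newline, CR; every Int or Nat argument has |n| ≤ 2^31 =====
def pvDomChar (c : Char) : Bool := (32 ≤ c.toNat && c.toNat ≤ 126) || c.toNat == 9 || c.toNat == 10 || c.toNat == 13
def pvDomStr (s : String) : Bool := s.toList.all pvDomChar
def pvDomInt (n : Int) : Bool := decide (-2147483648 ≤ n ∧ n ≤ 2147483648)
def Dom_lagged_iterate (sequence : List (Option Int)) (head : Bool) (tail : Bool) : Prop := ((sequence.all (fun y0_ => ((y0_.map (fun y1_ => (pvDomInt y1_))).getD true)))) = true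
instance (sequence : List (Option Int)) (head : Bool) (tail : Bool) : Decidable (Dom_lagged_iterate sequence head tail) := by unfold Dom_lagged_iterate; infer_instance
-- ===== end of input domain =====

-- B materializes the list and uses an offset-zip instead of A's running previous/has_any state machine (idiomatic decomposition; return value only — both Pythons are generators).

-- ===== PORT A =====
-- state: (yielded so far, has_any counter, previous)
def lagged_iterate (sequence : List (Option Int)) (head : Bool) (tail : Bool) : List (Option Int × Option Int) :=
  let st := sequence.foldl
    (fun (st : List (Option Int × Option Int) × Int × Option Int) current =>
      let acc :=
        if st.2.1 ≠ 0 then st.1 ++ [(st.2.2, current)]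
        else if head then st.1 ++ [(none, current)]
        else st.1
      (acc, st.2.1 + 1, current))
    ([], 0, none)
  if tail then st.1 ++ [(st.2.2, none)] else st.1

-- ===== PORT B =====
def lagged_iterate_alt (sequence : List (Option Int)) (head : Bool) (tail : Bool) : List (Option Int × Option Int) :=
  (if head then
     match sequence with
     | [] => []
     | x :: _ => [((none : Option Int), x)]
   else [])
  ++ sequence.zip sequence.tail
  ++ (if tail then
        [match sequence.getLast? with
         | some x => (x, (none : Option Int))
         | none => ((none : Option Int), (none : Option Int))]
      else [])

-- ===== PRECONDITION & SPEC =====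
def Spec_lagged_iterate (sequence : List (Option Int)) (head : Bool) (tail : Bool) (out : List (Option Int × Option Int)) : Prop := out = lagged_iterate_alt sequence head tail
instance (sequence : List (Option Int)) (head : Bool) (tail : Bool) (out : List (Option Int × Option Int)) : Decidable (Spec_lagged_iterate sequence head tail out) := by unfold Spec_lagged_iterate; infer_instance

-- ===== CLAIM (what is proved, stated in full; the proofs are below) =====
def Claim_equal_lagged_iterate : Prop := ∀ (sequence : List (Option Int)) (head : Bool) (tail : Bool), Dom_lagged_iterate sequence head tail → Spec_lagged_iterate sequence head tail (lagged_iterate sequence head tail)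

-- ===== LEMMAS AND PROOFS =====

-- After the first iteration the counter is positive forever, so A's loop just appends (previous, current) pairs: its state is the accumulator extended with zip (prev :: rest) rest, with last element as 'previous'.
theorem lagged_iterate_loop (head : Bool)
    (rest : List (Option Int)) :
    ∀ (acc : List (Option Int × Option Int)) (k : Int) (prev : Option Int), 1 ≤ k →
    rest.foldl
      (fun (st : List (Option Int × Option Int) × Int × Option Int) current =>
        let a :=
          if st.2.1 ≠ 0 then st.1 ++ [(st.2.2, current)]
          else if head then st.1 ++ [(none, current)]
          else st.1
        (a, st.2.1 + 1, current))
      (acc, k, prev)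
    = (acc ++ (prev :: rest).zip rest, k + rest.length, (prev :: rest).getLast (by simp)) := by
  induction rest with
  | nil => intro acc k prev hk; simp
  | cons x xs ih =>
      intro acc k prev hk
      have hk0 : k ≠ 0 := by omega
      simp only [List.foldl_cons, if_pos hk0]
      rw [ih (acc ++ [(prev, x)]) (k + 1) x (by omega)]
      refine congrArg₂ _ ?_ (congrArg₂ _ (by simp only [List.length_cons]; push_cast; omega) ?_)
      · simp [List.zip]
      · cases xs <;> simp [List.getLast]

theorem lagged_iterate_spec : Claim_equal_lagged_iterate := by
  intro sequence head tail _
  show lagged_iterate sequence head tail = lagged_iterate_alt sequence head tail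
  cases sequence with
  | nil => cases head <;> cases tail <;> simp [lagged_iterate, lagged_iterate_alt]
  | cons x xs =>
      unfold lagged_iterate lagged_iterate_alt
      simp only [List.foldl_cons]
      have h0 : ¬ ((0:Int) ≠ 0) := by norm_num
      simp only [if_neg h0, List.nil_append, zero_add]
      rw [lagged_iterate_loop head xs _ 1 x (le_refl 1)]
      have hlast : (x :: xs).getLast? = some ((x :: xs).getLast (by simp)) := by
        simp [List.getLast?_eq_some_getLast]
      cases tail <;> cases head <;>
        simp [hlast, List.zip]
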